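-- pv_equiv track=rewrite | github.com/Kadav1/sevastolink-galley-archive | scripts/import/repair_candidates.py | infer_time_class
-- ===== SOURCE A (Python) =====
-- from typing import Any
--
-- TIME_CLASS_ORDER = [
--     (15, "Under 15 min"),
--     (30, "15–30 min"),
--     (60, "30–60 min"),
--     (120, "1–2 hr"),
--     (240, "2–4 hr"),
-- ]
--
-- def infer_time_class(total_time_minutes: Any) -> str | None:
--     if total_time_minutes is None:
--         return None
--     try:
--         minutes = int(float(total_time_minutes))
--     except (TypeError, ValueError):
--         return None
--     for threshold, label in TIME_CLASS_ORDER: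
--         if minutes <= threshold:
--             return label
--     if minutes <= 12 * 60:
--         return "Half Day+"
--     return "Multi-Day"
-- ===== SOURCE B (Python) =====
-- from bisect import bisect_left
--
-- _THRESHOLDS = [15, 30, 60, 120, 240, 720]
-- _LABELS = ["Under 15 min", "15–30 min", "30–60 min", "1–2 hr", "2–4 hr", "Half Day+"]
--
-- def infer_time_class(total_time_minutes):
--     if total_time_minutes is None:
--         return None
--     try:
--         minutes = int(float(total_time_minutes))
--     except (TypeError, ValueError):
--         return None
--     idx = bisect_left(_THRESHOLDS, minutes)
--     return _LABELS[idx] if idx < len(_LABELS) else "Multi-Day"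
-- ===== Notes on version B (the rewrite author's own statement) =====
-- stated objective: idiomatic
-- what changed: Replaced the early-return linear scan over (threshold,label) pairs by a binary search (bisect_left) into a sorted threshold table with a parallel label list including the 720/'Half Day+' cutoff.
import Mathlib
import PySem

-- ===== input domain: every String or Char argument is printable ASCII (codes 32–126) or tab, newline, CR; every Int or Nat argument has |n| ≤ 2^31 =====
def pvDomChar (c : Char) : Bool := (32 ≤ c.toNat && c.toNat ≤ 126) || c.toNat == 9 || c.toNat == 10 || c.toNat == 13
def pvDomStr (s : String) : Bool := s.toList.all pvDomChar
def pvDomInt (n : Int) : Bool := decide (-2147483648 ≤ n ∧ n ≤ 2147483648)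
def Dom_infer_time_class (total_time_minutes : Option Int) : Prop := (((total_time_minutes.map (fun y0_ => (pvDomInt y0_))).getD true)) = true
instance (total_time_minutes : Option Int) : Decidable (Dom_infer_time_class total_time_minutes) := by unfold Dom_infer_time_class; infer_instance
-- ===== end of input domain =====

-- ===== PORT A =====
-- A: linear scan over TIME_CLASS_ORDER with early return; 'int(float(x))' is the
-- identity on Int inputs within Dom (|n| ≤ 2^31 < 2^53, exact in float), ported as such.
def timeClassOrder : List (Int × String) :=
  [(15, "Under 15 min"), (30, "15–30 min"), (60, "30–60 min"), (120, "1–2 hr"), (240, "2–4 hr")]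

-- the for-loop of A; base case = the code after the loop
def scanA (pairs : List (Int × String)) (minutes : Int) : Option String :=
  match pairs with
  | [] => if minutes ≤ 12 * 60 then some "Half Day+" else some "Multi-Day"
  | (threshold, label) :: rest =>
      if minutes ≤ threshold then some label else scanA rest minutes

def infer_time_class (total_time_minutes : Option Int) : Option String :=
  match total_time_minutes with
  | none => none
  | some minutes => scanA timeClassOrder minutes

-- ===== PORT B =====
-- B: binary search (Python's bisect.bisect_left, transcribed) into a sorted
-- threshold table with a parallel label list.
def bThresholds : List Int := [15, 30, 60, 120, 240, 720]
def bLabels : List String :=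
  ["Under 15 min", "15–30 min", "30–60 min", "1–2 hr", "2–4 hr", "Half Day+"]

-- bisect_left's lo/hi loop, step for step
def bisectLeftLoop (xs : List Int) (x : Int) (lo hi : Nat) : Nat :=
  if _h : lo < hi then
    let mid := (lo + hi) / 2
    if xs.getD mid 0 < x then bisectLeftLoop xs x (mid + 1) hi
    else bisectLeftLoop xs x lo mid
  else lo
termination_by hi - lo
decreasing_by all_goals omega

def infer_time_class_alt (total_time_minutes : Option Int) : Option String :=
  match total_time_minutes with
  | none => none
  | some minutes =>
      let idx := bisectLeftLoop bThresholds minutes 0 bThresholds.length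
      if idx < bLabels.length then bLabels[idx]? else some "Multi-Day"

-- ===== PRECONDITION & SPEC =====
def Spec_infer_time_class (total_time_minutes : Option Int) (out : Option String) : Prop := out = infer_time_class_alt total_time_minutes
instance (total_time_minutes : Option Int) (out : Option String) : Decidable (Spec_infer_time_class total_time_minutes out) := by unfold Spec_infer_time_class; infer_instance

-- ===== CLAIM (what is proved, stated in full; the proofs are below) =====
def Claim_equal_infer_time_class : Prop := ∀ (total_time_minutes : Option Int), Dom_infer_time_class total_time_minutes → Spec_infer_time_class total_time_minutes (infer_time_class total_time_minutes)

-- ===== LEMMAS AND PROOFS =====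

-- ===== VERDICT (by name: the statement is the Claim_ definition above) =====
theorem infer_time_class_spec : Claim_equal_infer_time_class := by
  intro t _
  unfold Spec_infer_time_class
  cases t with
  | none => rfl
  | some m =>
    show scanA timeClassOrder m = infer_time_class_alt (some m)
    simp [infer_time_class_alt, timeClassOrder, bThresholds, bLabels, scanA, bisectLeftLoop]
    split_ifs <;> first | rfl | omega
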